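-- pv_equiv track=rewrite | github.com/bipowerhcmcity/Music-Sheet-Pitch-Translation | ReduceSharp.py | getNonSharpNote
-- ===== SOURCE A (Python) =====
-- def getNonSharpNote(staffs):
--     index = []
--     for staff in staffs:
--         subIndex = []
--         j=0
--         for i in range(len(staff)):
--             if(staff[i][2] == "NONE"):
--                 j+=1
--                 continue
--             else:
--                 if(staff[i][3] == False):
--                     subIndex.append(i-j)
--         index.append(subIndex)
--     return index
-- ===== SOURCE B (Python) =====
-- def getNonSharpNote(staffs):
--     index = []
--     for staff in staffs:
--         filtered = [note for note in staff if note[2] != "NONE"]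
--         subIndex = [k for k, note in enumerate(filtered) if note[3] == False]
--         index.append(subIndex)
--     return index
-- ===== Notes on version B (the rewrite author's own statement) =====
-- stated objective: simpler
-- what changed: Replaces the running NONE-offset counter (i-j) with an explicit filter of non-NONE notes followed by an enumerate pass collecting the positions of unsharped notes.
import Mathlib
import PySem

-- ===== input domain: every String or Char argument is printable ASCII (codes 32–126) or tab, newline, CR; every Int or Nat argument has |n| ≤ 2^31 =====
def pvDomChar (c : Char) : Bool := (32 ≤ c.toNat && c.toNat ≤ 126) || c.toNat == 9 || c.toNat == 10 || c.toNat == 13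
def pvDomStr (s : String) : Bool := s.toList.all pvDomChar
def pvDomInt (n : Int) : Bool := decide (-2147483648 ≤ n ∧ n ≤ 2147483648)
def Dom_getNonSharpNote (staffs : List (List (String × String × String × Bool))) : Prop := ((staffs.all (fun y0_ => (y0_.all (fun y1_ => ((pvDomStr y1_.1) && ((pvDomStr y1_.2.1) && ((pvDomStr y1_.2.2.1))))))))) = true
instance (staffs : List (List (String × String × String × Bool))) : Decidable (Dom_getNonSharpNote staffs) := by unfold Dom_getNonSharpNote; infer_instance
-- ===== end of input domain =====

-- B replaces A's running NONE-offset counter (i-j) with an explicit filter of the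
-- non-NONE notes followed by an enumerate pass; simpler decomposition, same cost.

-- ===== PORT A =====
-- inner loop of A: walks the staff with index i and NONE-counter j, appending i-j
def getNonSharpNoteGoA : List (String × String × String × Bool) → Int → Int → List Int
  | [], _, _ => []
  | n :: rest, i, j =>
    if n.2.2.1 == "NONE" then getNonSharpNoteGoA rest (i + 1) (j + 1)
    else if n.2.2.2 == false then (i - j) :: getNonSharpNoteGoA rest (i + 1) j
    else getNonSharpNoteGoA rest (i + 1) j

def getNonSharpNote (staffs : List (List (String × String × String × Bool))) : List (List Int) :=
  staffs.foldl (fun index staff => index ++ [getNonSharpNoteGoA staff 0 0]) []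

-- ===== PORT B =====
def getNonSharpNote_alt (staffs : List (List (String × String × String × Bool))) : List (List Int) :=
  staffs.map (fun staff =>
    let filtered := staff.filter (fun n => n.2.2.1 != "NONE")
    (PySem.List.enumerate filtered 0).filterMap
      (fun p => if p.2.2.2.2 == false then some p.1 else none))

-- ===== PRECONDITION & SPEC =====
def Spec_getNonSharpNote (staffs : List (List (String × String × String × Bool))) (out : List (List Int)) : Prop := out = getNonSharpNote_alt staffs
instance (staffs : List (List (String × String × String × Bool))) (out : List (List Int)) : Decidable (Spec_getNonSharpNote staffs out) := by unfold Spec_getNonSharpNote; infer_instance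

-- ===== CLAIM (what is proved, stated in full; the proofs are below) =====
def Claim_equal_getNonSharpNote : Prop := ∀ (staffs : List (List (String × String × String × Bool))), Dom_getNonSharpNote staffs → Spec_getNonSharpNote staffs (getNonSharpNote staffs)

-- ===== LEMMAS AND PROOFS =====

-- A's counter walk equals B's filter-then-enumerate pass, started at offset i - j.
theorem goA_eq_enum (staff : List (String × String × String × Bool)) :
    ∀ i j : Int, getNonSharpNoteGoA staff i j =
      (PySem.List.enumerate (staff.filter (fun n => n.2.2.1 != "NONE")) (i - j)).filterMap
        (fun p => if p.2.2.2.2 == false then some p.1 else none) := by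
  induction staff with
  | nil => intro i j; simp [getNonSharpNoteGoA, PySem.List.enumerate_nil]
  | cons n rest ih =>
    intro i j
    by_cases h : n.2.2.1 = "NONE"
    · have : getNonSharpNoteGoA (n :: rest) i j = getNonSharpNoteGoA rest (i + 1) (j + 1) := by
        simp [getNonSharpNoteGoA, h]
      rw [this, ih]
      have harg : i + 1 - (j + 1) = i - j := by ring
      simp [h, harg]
    · have hfil : (n :: rest).filter (fun n => n.2.2.1 != "NONE")
          = n :: rest.filter (fun n => n.2.2.1 != "NONE") := by
        simp [h]
      rw [hfil, PySem.List.enumerate_cons]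
      by_cases hb : n.2.2.2 = false
      · have : getNonSharpNoteGoA (n :: rest) i j = (i - j) :: getNonSharpNoteGoA rest (i + 1) j := by
          simp [getNonSharpNoteGoA, h, hb]
        rw [this, ih]
        have harg : i + 1 - j = i - j + 1 := by ring
        simp [List.filterMap, hb, harg]
      · have : getNonSharpNoteGoA (n :: rest) i j = getNonSharpNoteGoA rest (i + 1) j := by
          simp [getNonSharpNoteGoA, h, hb]
        rw [this, ih]
        have harg : i + 1 - j = i - j + 1 := by ring
        simp [List.filterMap, hb, harg]

-- ===== VERDICT (by name: the statement is the Claim_ definition above) =====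
theorem getNonSharpNote_spec : Claim_equal_getNonSharpNote := by
  intro staffs _
  unfold Spec_getNonSharpNote getNonSharpNote getNonSharpNote_alt
  rw [PySem.List.foldl_append_singleton_eq_map]
  refine List.map_congr_left (fun staff _ => ?_)
  have := goA_eq_enum staff 0 0
  simpa using this
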